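-- pv_equiv track=rewrite | github.com/win4r/ClawTeam-OpenClaw | clawteam/services/task_update_service.py | _has_meaningful_bullets
-- ===== SOURCE A (Python) =====
-- def _normalize_bullet_block(value: str) -> list[str]:
--     text = (value or "").strip()
--     if not text:
--         return []
--     normalized: list[str] = []
--     for raw_line in text.splitlines():
--         line = raw_line.strip()
--         if not line or not line.startswith("-"):
--             continue
--         entry = line[1:].strip()
--         if entry:
--             normalized.append(entry)
--     return normalized
--
-- def _has_meaningful_bullets(value: str) -> bool:
--     entries = _normalize_bullet_block(value)
--     if not entries:
--         return False
--     blacklist = {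
--         "none",
--         "n/a",
--         "na",
--         "no",
--         "no change",
--         "no changes",
--         "unchanged",
--         "no-op",
--         "noop",
--     }
--     for entry in entries:
--         normalized = entry.strip().lower()
--         if normalized in blacklist:
--             continue
--         if normalized.startswith("none"):
--             continue
--         return True
--     return False
-- ===== SOURCE B (Python) =====
-- _BULLET_BLACKLIST = frozenset({
--     "none",
--     "n/a",
--     "na",
--     "no",
--     "no change",
--     "no changes",
--     "unchanged",
--     "no-op",
--     "noop",
-- })
--
-- def _has_meaningful_bullets(value: str) -> bool:
--     # Single fused pass with early return: no intermediate normalized list.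
--     for raw_line in (value or "").strip().splitlines():
--         line = raw_line.strip()
--         if line.startswith("-"):
--             entry = line[1:].strip().lower()
--             if entry and entry not in _BULLET_BLACKLIST and not entry.startswith("none"):
--                 return True
--     return False
-- ===== Notes on version B (the rewrite author's own statement) =====
-- stated objective: simpler
-- what changed: B replaces A's two-phase helper design (build a normalized bullet list, then scan it against the blacklist) by one fused pass over the lines with an early return, never materialising the intermediate list and merging the blank/dash/empty-entry/blacklist checks into a single condition.
import Mathlib
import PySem

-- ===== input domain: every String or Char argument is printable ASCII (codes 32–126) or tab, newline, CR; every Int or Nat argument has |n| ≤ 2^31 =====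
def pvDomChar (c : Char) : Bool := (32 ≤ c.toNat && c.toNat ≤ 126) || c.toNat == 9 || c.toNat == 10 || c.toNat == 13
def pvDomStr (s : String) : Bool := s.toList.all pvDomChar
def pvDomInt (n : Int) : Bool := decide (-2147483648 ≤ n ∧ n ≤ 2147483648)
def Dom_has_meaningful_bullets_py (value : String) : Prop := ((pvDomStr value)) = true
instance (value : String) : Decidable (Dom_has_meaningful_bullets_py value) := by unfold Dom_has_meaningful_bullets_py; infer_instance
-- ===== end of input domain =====

-- B replaces A's two-phase design (build a normalized bullet list, then scan it) by one
-- fused pass over the lines with an early return (objective: simpler; same asymptotics).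

-- ===== PORT A =====
-- helper _normalize_bullet_block: build the list of stripped bullet entries
def pvNormalizeBulletBlock (value : String) : List String :=
  let text := PySem.Str.strip value
  if text = "" then []
  else
    (PySem.Str.splitlines text).foldl
      (fun normalized raw_line =>
        let line := PySem.Str.strip raw_line
        if line = "" || !(PySem.Str.startswith line "-") then normalized
        else
          let entry := PySem.Str.strip (PySem.Str.slice line (some 1) none)
          if entry ≠ "" then normalized ++ [entry] else normalized)
      []

-- A's blacklist set literal
def pvBlacklistA : List String :=
  ["none", "n/a", "na", "no", "no change", "no changes", "unchanged", "no-op", "noop"]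

-- A's for-loop over entries with early `return True`
def pvScanEntries : List String → Bool
  | [] => false
  | entry :: rest =>
    let normalized := PySem.Str.lower (PySem.Str.strip entry)
    if pvBlacklistA.contains normalized then pvScanEntries rest
    else if PySem.Str.startswith normalized "none" then pvScanEntries rest
    else true

def has_meaningful_bullets_py (value : String) : Bool :=
  let entries := pvNormalizeBulletBlock value
  if entries = [] then false
  else pvScanEntries entries

-- ===== PORT B =====
def pvBlacklistB : List String :=
  ["none", "n/a", "na", "no", "no change", "no changes", "unchanged", "no-op", "noop"]

-- B's single fused loop over the lines with early `return True`
def pvScanLines : List String → Bool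
  | [] => false
  | raw_line :: rest =>
    let line := PySem.Str.strip raw_line
    if PySem.Str.startswith line "-" then
      let entry := PySem.Str.lower (PySem.Str.strip (PySem.Str.slice line (some 1) none))
      if entry ≠ "" && !pvBlacklistB.contains entry && !(PySem.Str.startswith entry "none") then
        true
      else pvScanLines rest
    else pvScanLines rest

def has_meaningful_bullets_py_alt (value : String) : Bool :=
  pvScanLines (PySem.Str.splitlines (PySem.Str.strip value))

-- ===== PRECONDITION & SPEC =====
def Spec_has_meaningful_bullets_py (value : String) (out : Bool) : Prop := out = has_meaningful_bullets_py_alt value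
instance (value : String) (out : Bool) : Decidable (Spec_has_meaningful_bullets_py value out) := by unfold Spec_has_meaningful_bullets_py; infer_instance

-- ===== CLAIM (what is proved, stated in full; the proofs are below) =====
def Claim_equal_has_meaningful_bullets_py : Prop := ∀ (value : String), Dom_has_meaningful_bullets_py value → Spec_has_meaningful_bullets_py value (has_meaningful_bullets_py value)

-- ===== LEMMAS AND PROOFS =====

theorem dw_idem (p : Char → Bool) (l : List Char) :
    List.dropWhile p (List.dropWhile p l) = List.dropWhile p l := by
  rw [List.dropWhile_eq_self_iff]
  intro hl hx
  have h := List.head_dropWhile_not p (l := l) (by intro h; rw [h] at hl; simp at hl)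
  rw [List.head_eq_getElem] at h
  simp [h] at hx

theorem dw_prefix (p : Char → Bool) (u t : List Char) (hu : u <+: t)
    (ht : List.dropWhile p t = t) : List.dropWhile p u = u := by
  rw [List.dropWhile_eq_self_iff] at *
  intro hl
  obtain ⟨s, rfl⟩ := hu
  have := ht (by simp; omega)
  rwa [List.getElem_append_left hl] at this

theorem rstrip_prefix (t : List Char) : PySem.Chars.rstrip t <+: t := by
  have h : List.dropWhile PySem.Chars.isspace t.reverse <:+ t.reverse :=
    List.dropWhile_suffix _
  have h2 := List.reverse_prefix.mpr h
  rw [List.reverse_reverse] at h2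
  exact h2

theorem chars_strip_idem (s : List Char) :
    PySem.Chars.strip (PySem.Chars.strip s) = PySem.Chars.strip s := by
  simp only [PySem.Chars.strip, PySem.Chars.lstrip, PySem.Chars.rstrip]
  have h1 : List.dropWhile PySem.Chars.isspace
      ((List.dropWhile PySem.Chars.isspace (List.dropWhile PySem.Chars.isspace s).reverse).reverse)
      = (List.dropWhile PySem.Chars.isspace (List.dropWhile PySem.Chars.isspace s).reverse).reverse := by
    apply dw_prefix _ _ (List.dropWhile PySem.Chars.isspace s)
    · simpa [PySem.Chars.rstrip] using rstrip_prefix (List.dropWhile PySem.Chars.isspace s)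
    · exact dw_idem _ _
  rw [h1, List.reverse_reverse, dw_idem]

theorem str_strip_idem (s : String) :
    PySem.Str.strip (PySem.Str.strip s) = PySem.Str.strip s := by
  simp [PySem.Str.strip, chars_strip_idem]

theorem lower_ne_empty (s : String) (h : s ≠ "") : PySem.Str.lower s ≠ "" := by
  intro hc
  apply h
  have := congrArg String.toList hc
  simp [PySem.Str.lower, PySem.Chars.lower] at this
  exact String.ext (by simp [this])

theorem pv_if_true_or (b x : Bool) : (if b then true else x) = (b || x) := by
  cases b <;> rfl

-- A's builder step function (A's loop body, named for the proofs)
def pvStepA (normalized : List String) (raw_line : String) : List String :=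
  let line := PySem.Str.strip raw_line
  if line = "" || !(PySem.Str.startswith line "-") then normalized
  else
    let entry := PySem.Str.strip (PySem.Str.slice line (some 1) none)
    if entry ≠ "" then normalized ++ [entry] else normalized

theorem pv_normalize_eq (value : String) :
    pvNormalizeBulletBlock value =
      (PySem.Str.splitlines (PySem.Str.strip value)).foldl pvStepA [] := by
  simp only [pvNormalizeBulletBlock]
  by_cases ht : PySem.Str.strip value = ""
  · rw [if_pos ht, ht]
    decide
  · rw [if_neg ht]
    rfl

theorem scan_entries_append (xs ys : List String) :
    pvScanEntries (xs ++ ys) = (pvScanEntries xs || pvScanEntries ys) := by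
  induction xs with
  | nil => rfl
  | cons x rest ih =>
    simp only [List.cons_append, pvScanEntries, ih]
    split_ifs <;> simp

theorem scan_entries_single (x : String) :
    pvScanEntries [PySem.Str.strip x] =
      (!(pvBlacklistB.contains (PySem.Str.lower (PySem.Str.strip x))) &&
       !(PySem.Str.startswith (PySem.Str.lower (PySem.Str.strip x)) "none")) := by
  simp only [pvScanEntries, str_strip_idem]
  have hb : pvBlacklistA = pvBlacklistB := rfl
  rw [hb]
  split_ifs with h1 h2
  · rw [h1]; rfl
  · rw [Bool.not_eq_true] at h1
    rw [h1, h2]; rfl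
  · rw [Bool.not_eq_true] at h1 h2
    rw [h1, h2]; rfl

theorem scan_lines_cons (raw : String) (rest : List String) :
    pvScanLines (raw :: rest) =
      (if PySem.Str.startswith (PySem.Str.strip raw) "-" then
        (if (PySem.Str.lower (PySem.Str.strip (PySem.Str.slice (PySem.Str.strip raw) (some 1) none)) ≠ "" &&
             !pvBlacklistB.contains
               (PySem.Str.lower (PySem.Str.strip (PySem.Str.slice (PySem.Str.strip raw) (some 1) none))) &&
             !(PySem.Str.startswith
               (PySem.Str.lower (PySem.Str.strip (PySem.Str.slice (PySem.Str.strip raw) (some 1) none))) "none"))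
         then true else pvScanLines rest)
       else pvScanLines rest) := rfl

theorem scan_foldl (ls : List String) : ∀ acc : List String,
    pvScanEntries (ls.foldl pvStepA acc) = (pvScanEntries acc || pvScanLines ls) := by
  induction ls with
  | nil => intro acc; simp [pvScanLines]
  | cons raw rest ih =>
    intro acc
    rw [List.foldl_cons, ih, scan_lines_cons]
    by_cases hsw : PySem.Str.startswith (PySem.Str.strip raw) "-" = true
    · have hne : PySem.Str.strip raw ≠ "" := by
        intro h; rw [h] at hsw; exact absurd hsw (by decide)
      rw [if_pos hsw]
      have hstep : pvStepA acc raw =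
          (if PySem.Str.strip (PySem.Str.slice (PySem.Str.strip raw) (some 1) none) ≠ "" then
            acc ++ [PySem.Str.strip (PySem.Str.slice (PySem.Str.strip raw) (some 1) none)]
          else acc) := by
        simp only [pvStepA]
        rw [if_neg (by rw [hsw, decide_eq_false hne]; decide)]
      by_cases he : PySem.Str.strip (PySem.Str.slice (PySem.Str.strip raw) (some 1) none) = ""
      · have hlow : PySem.Str.lower
            (PySem.Str.strip (PySem.Str.slice (PySem.Str.strip raw) (some 1) none)) = "" := by
          rw [he]; decide
        rw [hstep, if_neg (not_not_intro he), hlow]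
        have hd : (decide (("" : String) ≠ "")) = false := by decide
        simp only [hd, Bool.false_and]
        rfl
      · have hlow := lower_ne_empty _ he
        have hdi : (decide (PySem.Str.lower
            (PySem.Str.strip (PySem.Str.slice (PySem.Str.strip raw) (some 1) none)) ≠ "")) = true :=
          decide_eq_true hlow
        rw [hstep, if_pos he, scan_entries_append, scan_entries_single, Bool.or_assoc,
          pv_if_true_or, hdi, Bool.true_and]
    · rw [if_neg hsw]
      rw [Bool.not_eq_true] at hsw
      have hstep : pvStepA acc raw = acc := by
        simp only [pvStepA]
        rw [if_pos (by rw [hsw]; simp)]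
      rw [hstep]

-- ===== VERDICT (by name: the statement is the Claim_ definition above) =====
theorem has_meaningful_bullets_py_spec : Claim_equal_has_meaningful_bullets_py := by
  intro value _
  show has_meaningful_bullets_py value = has_meaningful_bullets_py_alt value
  simp only [has_meaningful_bullets_py, has_meaningful_bullets_py_alt, pv_normalize_eq]
  have hs := scan_foldl (PySem.Str.splitlines (PySem.Str.strip value)) []
  have h0 : pvScanEntries [] = false := rfl
  rw [h0, Bool.false_or] at hs
  by_cases hnil : (PySem.Str.splitlines (PySem.Str.strip value)).foldl pvStepA [] = []
  · rw [if_pos hnil]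
    rw [hnil, h0] at hs
    exact hs
  · rw [if_neg hnil]
    exact hs
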